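-- pv_equiv track=rewrite | github.com/James-HoneyBadger/Time_Warp_Studio | Platforms/Python/time_warp/languages/lua.py | _split_inline_stmts
-- ===== SOURCE A (Python) =====
-- def _split_inline_stmts(text: str) -> list[str]:
--     """Split inline statements at depth-0 ``end`` boundaries.
--
--     Example: ``"if x then y end z"`` → ``["if x then y end", "z"]``
--     """
--     parts: list[str] = []
--     depth = 0
--     start = 0
--     i = 0
--     n = len(text)
--     while i < n:
--         # word-boundary-safe keyword check helper
--         def _kw_at(kw: str) -> bool:
--             end_pos = i + len(kw)
--             if text[i:end_pos] != kw:
--                 return False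
--             if i > 0 and (text[i - 1].isalnum() or text[i - 1] == "_"):
--                 return False
--             if end_pos < n and (text[end_pos].isalnum() or text[end_pos] == "_"):
--                 return False
--             return True
--
--         for kw in ("if", "for", "while", "function", "repeat", "do"):
--             if _kw_at(kw):
--                 depth += 1
--                 break
--         if _kw_at("end"):
--             depth -= 1
--             if depth == 0:
--                 part = text[start : i + 3].strip()
--                 if part:
--                     parts.append(part)
--                 start = i + 3
--         i += 1
--     remaining = text[start:].strip()
--     if remaining:
--         parts.append(remaining)
--     return parts if parts else [text.strip()]
-- ===== SOURCE B (Python) =====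
-- def _split_inline_stmts(text: str) -> list[str]:
--     """Split inline statements at depth-0 ``end`` boundaries.
--
--     Two-phase rewrite: first collect the maximal word tokens (runs of
--     alphanumerics/underscores) with their end offsets, then fold over the
--     token list adjusting the nesting depth and cutting at depth-0 'end's.
--     """
--     # phase 1: tokenize
--     tokens: list[tuple[str, int]] = []
--     n = len(text)
--     i = 0
--     while i < n:
--         if text[i].isalnum() or text[i] == "_":
--             j = i + 1
--             while j < n and (text[j].isalnum() or text[j] == "_"):
--                 j += 1
--             tokens.append((text[i:j], j))
--             i = j
--         else:
--             i += 1
--     # phase 2: fold over tokens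
--     parts: list[str] = []
--     depth = 0
--     start = 0
--     for word, end in tokens:
--         if word in ("if", "for", "while", "function", "repeat", "do"):
--             depth += 1
--         elif word == "end":
--             depth -= 1
--             if depth == 0:
--                 part = text[start:end].strip()
--                 if part:
--                     parts.append(part)
--                 start = end
--     remaining = text[start:].strip()
--     if remaining:
--         parts.append(remaining)
--     return parts if parts else [text.strip()]
-- ===== Notes on version B (the rewrite author's own statement) =====
-- stated objective: alternative
-- what changed: Replaced A's per-character scan that probes all seven keywords at every index with word-boundary substring checks by a two-phase pass: tokenize the text once into maximal word tokens with their end offsets, then fold over the token list adjusting depth and cutting at depth-0 'end' tokens.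
import Mathlib
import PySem

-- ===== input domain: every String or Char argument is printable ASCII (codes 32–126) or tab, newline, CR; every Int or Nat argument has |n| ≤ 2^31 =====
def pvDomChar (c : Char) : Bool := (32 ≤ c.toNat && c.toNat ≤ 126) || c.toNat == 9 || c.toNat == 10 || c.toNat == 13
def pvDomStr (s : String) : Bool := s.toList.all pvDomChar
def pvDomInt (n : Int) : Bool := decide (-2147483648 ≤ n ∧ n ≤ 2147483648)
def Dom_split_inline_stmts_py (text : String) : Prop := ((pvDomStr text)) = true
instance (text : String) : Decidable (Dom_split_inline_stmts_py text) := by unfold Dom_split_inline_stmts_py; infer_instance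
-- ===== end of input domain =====

set_option maxRecDepth 4096


-- B replaces A's per-position keyword probing by a two-phase pass (tokenize once, then fold over
-- the word tokens); objective: alternative/idiomatic structure, same exact output.

-- shared helpers: the word-character test (isalnum or '_') and the identical trailing code of
-- both Pythons (remaining = text[start:].strip(); append if nonempty; default [text.strip()])
def pvWord (c : Char) : Bool := PySem.Chars.isalnum c || c == '_'

def pvOpeners : List (List Char) :=
  [['i','f'], ['f','o','r'], ['w','h','i','l','e'],
   ['f','u','n','c','t','i','o','n'], ['r','e','p','e','a','t'], ['d','o']]

def pvEndKw : List Char := ['e','n','d']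

def pvFinish (cs : List Char) (parts : List (List Char)) (start : Nat) : List (List Char) :=
  let remaining := PySem.Chars.strip (cs.drop start)
  let parts := if remaining = [] then parts else parts ++ [remaining]
  if parts = [] then [PySem.Chars.strip cs] else parts

-- ===== PORT A =====
-- _kw_at: text[i:i+len kw] == kw (Python slice with 0 ≤ i = drop/take, exact) and both
-- word boundaries; text[i-1] / text[end_pos] are in-range accesses (getD exact there)
def pvKwAt (cs : List Char) (n i : Nat) (kw : List Char) : Bool :=
  if (cs.drop i).take kw.length ≠ kw then false
  else if 0 < i ∧ pvWord (cs.getD (i-1) ' ') = true then false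
  else if i + kw.length < n ∧ pvWord (cs.getD (i + kw.length) ' ') = true then false
  else true

def pvLoopA (cs : List Char) (n i : Nat) (depth : Int) (start : Nat)
    (parts : List (List Char)) : List (List Char) :=
  if _h : i < n then
    let depth1 := if pvOpeners.any (fun kw => pvKwAt cs n i kw) then depth + 1 else depth
    if pvKwAt cs n i pvEndKw then
      let depth2 := depth1 - 1
      if depth2 = 0 then
        let part := PySem.Chars.strip ((cs.take (i+3)).drop start)
        pvLoopA cs n (i+1) depth2 (i+3) (if part = [] then parts else parts ++ [part])
      else pvLoopA cs n (i+1) depth2 start parts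
    else pvLoopA cs n (i+1) depth1 start parts
  else pvFinish cs parts start
termination_by n - i

def split_inline_stmts_py (text : String) : List String :=
  (pvLoopA text.toList text.toList.length 0 0 0 []).map String.ofList

-- ===== PORT B =====
-- phase 1 of Source B: j advances over word characters
def pvTokEnd (cs : List Char) (n j : Nat) : Nat :=
  if _h : j < n then
    if pvWord (cs.getD j ' ') then pvTokEnd cs n (j+1) else j
  else j
termination_by n - j

-- needed by pvTokenize's termination (the port cites it in decreasing_by)
theorem le_pvTokEnd (cs : List Char) (n j : Nat) : j ≤ pvTokEnd cs n j := by
  fun_induction pvTokEnd cs n j <;> omega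

def pvTokenize (cs : List Char) (n i : Nat) : List (List Char × Nat) :=
  if _h : i < n then
    if pvWord (cs.getD i ' ') then
      let j := pvTokEnd cs n (i+1)
      ((cs.take j).drop i, j) :: pvTokenize cs n j   -- text[i:j], exact for 0 ≤ i, j
    else pvTokenize cs n (i+1)
  else []
termination_by n - i
decreasing_by
  · have := le_pvTokEnd cs n (i+1); omega
  · omega

-- phase 2 of Source B: one fold step over a (word, end) token
def pvStepB (cs : List Char) (st : List (List Char) × Int × Nat)
    (tok : List Char × Nat) : List (List Char) × Int × Nat :=
  if tok.1 ∈ pvOpeners then (st.1, st.2.1 + 1, st.2.2)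
  else if tok.1 = pvEndKw then
    if st.2.1 - 1 = 0 then
      let part := PySem.Chars.strip ((cs.take tok.2).drop st.2.2)
      ((if part = [] then st.1 else st.1 ++ [part]), st.2.1 - 1, tok.2)
    else (st.1, st.2.1 - 1, st.2.2)
  else st

def split_inline_stmts_py_alt (text : String) : List String :=
  let cs := text.toList
  let st := (pvTokenize cs cs.length 0).foldl (pvStepB cs) ([], 0, 0)
  (pvFinish cs st.1 st.2.2).map String.ofList

-- ===== PRECONDITION & SPEC =====
def Spec_split_inline_stmts_py (text : String) (out : List String) : Prop := out = split_inline_stmts_py_alt text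
instance (text : String) (out : List String) : Decidable (Spec_split_inline_stmts_py text out) := by unfold Spec_split_inline_stmts_py; infer_instance

-- ===== CLAIM (what is proved, stated in full; the proofs are below) =====
def Claim_equal_split_inline_stmts_py : Prop := ∀ (text : String), Dom_split_inline_stmts_py text → Spec_split_inline_stmts_py text (split_inline_stmts_py text)

-- ===== LEMMAS AND PROOFS =====

theorem pvTokEnd_le (cs : List Char) (n j : Nat) (h : j ≤ n) : pvTokEnd cs n j ≤ n := by
  fun_induction pvTokEnd cs n j <;> omega

theorem pvTokEnd_word (cs : List Char) (n j : Nat) :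
    ∀ k, j ≤ k → k < pvTokEnd cs n j → pvWord (cs.getD k ' ') = true := by
  fun_induction pvTokEnd cs n j with
  | case1 j hj hw ih =>
      intro k hk1 hk2
      rcases Nat.lt_or_ge j k with h | h
      · exact ih k h hk2
      · have : k = j := Nat.le_antisymm h hk1
        simpa [this] using hw
  | case2 j hj hw => intro k hk1 hk2; omega
  | case3 j hj => intro k hk1 hk2; omega

theorem pvTokEnd_stop (cs : List Char) (n j : Nat) (h : pvTokEnd cs n j < n) :
    pvWord (cs.getD (pvTokEnd cs n j) ' ') = false := by
  fun_induction pvTokEnd cs n j with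
  | case1 j hj hw ih => exact ih h
  | case2 j hj hw => simpa using hw
  | case3 j hj => omega

theorem pvTokEnd_eq_of (cs : List Char) (n e : Nat) (hen : e ≤ n)
    (hstop : e < n → pvWord (cs.getD e ' ') = false) (j : Nat) :
    j ≤ e → (∀ k, j ≤ k → k < e → pvWord (cs.getD k ' ') = true) → pvTokEnd cs n j = e := by
  fun_induction pvTokEnd cs n j with
  | case1 j hj hw ih =>
      intro hje hall
      have hlt : j < e := by
        rcases Nat.lt_or_ge j e with h | h
        · exact h
        · have hje' : j = e := by omega
          rw [hje', hstop (by omega)] at hw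
          simp at hw
      exact ih (by omega) (fun k hk1 hk2 => hall k (by omega) hk2)
  | case2 j hj hw =>
      intro hje hall
      by_contra hne
      have : j < e := by omega
      rw [hall j le_rfl this] at hw
      simp at hw
  | case3 j hj =>
      intro hje hall
      omega

theorem kwAt_false_of_prevword (cs : List Char) (n k : Nat) (kw : List Char)
    (h0 : 0 < k) (hw : pvWord (cs.getD (k-1) ' ') = true) : pvKwAt cs n k kw = false := by
  unfold pvKwAt
  split
  · rfl
  · rw [if_pos ⟨h0, hw⟩]

theorem kwAt_false_of_nonword (cs : List Char) (n i : Nat) (kw : List Char)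
    (hw : pvWord (cs.getD i ' ') = false) (hkw : kw ≠ [])
    (hhead : pvWord (kw.headD ' ') = true) : pvKwAt cs n i kw = false := by
  unfold pvKwAt
  split
  · rfl
  next h1 =>
    exfalso
    obtain ⟨c, t, rfl⟩ := List.exists_cons_of_ne_nil hkw
    have heq : (cs.drop i).take (c :: t).length = c :: t := not_not.mp h1
    cases hd : cs.drop i with
    | nil => rw [hd] at heq; simp at heq
    | cons a as =>
        rw [hd] at heq
        have hac : a = c := by
          simp [List.take_succ_cons] at heq
          exact heq.1
        have hgd : cs.getD i ' ' = c := by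
          rw [List.getD_eq_getElem?_getD, ← List.head?_drop, hd, hac]
          rfl
        rw [hgd] at hw
        simp [List.headD] at hhead
        rw [hhead] at hw
        exact absurd hw (by simp)

theorem kwAt_eq_token (cs : List Char) (n i : Nat) (kw : List Char)
    (hn : n = cs.length) (hi : i < n)
    (_hw : pvWord (cs.getD i ' ') = true)
    (hb : i = 0 ∨ pvWord (cs.getD (i-1) ' ') = false)
    (hkw : kw ≠ []) (hall : kw.all pvWord = true) :
    pvKwAt cs n i kw = decide ((cs.take (pvTokEnd cs n (i+1))).drop i = kw) := by
  have hij : i + 1 ≤ pvTokEnd cs n (i+1) := le_pvTokEnd cs n (i+1)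
  have hjn : pvTokEnd cs n (i+1) ≤ n := pvTokEnd_le cs n (i+1) (by omega)
  by_cases htok : (cs.take (pvTokEnd cs n (i+1))).drop i = kw
  · have hlen : kw.length = pvTokEnd cs n (i+1) - i := by
      have := congrArg List.length htok
      simp [List.length_take, List.length_drop] at this
      omega
    have hep : i + kw.length = pvTokEnd cs n (i+1) := by omega
    unfold pvKwAt
    rw [if_neg (by
        have : (cs.drop i).take kw.length = kw := by
          rw [hlen, ← List.drop_take]
          exact htok
        simp [this])]
    rw [if_neg (by
        rintro ⟨h1, h2⟩
        rcases hb with h | h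
        · omega
        · rw [h] at h2; exact absurd h2 (by simp))]
    rw [if_neg (by
        rintro ⟨h1, h2⟩
        rw [hep] at h1 h2
        rw [pvTokEnd_stop cs n (i+1) h1] at h2
        exact absurd h2 (by simp))]
    simp [htok]
  · simp only [htok, decide_false]
    unfold pvKwAt
    split
    · rfl
    next h1 =>
      have heq : (cs.drop i).take kw.length = kw := not_not.mp h1
      have hLle : kw.length ≤ cs.length - i := by
        have := congrArg List.length heq
        simp [List.length_take, List.length_drop] at this
        omega
      have hword : ∀ k, i ≤ k → k < i + kw.length → pvWord (cs.getD k ' ') = true := by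
        intro k hk1 hk2
        have hm : k - i < kw.length := by omega
        have hkl : k < cs.length := by omega
        have hcs : kw[k-i]? = cs[k]? := by
          rw [← heq, List.getElem?_take_of_lt hm, List.getElem?_drop,
            show i + (k - i) = k by omega]
        obtain ⟨c, hc⟩ : ∃ c, cs[k]? = some c := ⟨cs[k]'hkl, List.getElem?_eq_getElem hkl⟩
        have hmem : c ∈ kw := List.mem_of_getElem? (hcs.trans hc)
        have hgd : cs.getD k ' ' = c := by
          rw [List.getD_eq_getElem?_getD, hc]
          rfl
        rw [hgd]
        exact (by simpa using List.all_eq_true.mp hall : ∀ c ∈ kw, pvWord c = true) _ hmem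
      rw [if_neg (by
          rintro ⟨h1', h2'⟩
          rcases hb with h | h
          · omega
          · rw [h] at h2'; exact absurd h2' (by simp))]
      by_cases h3 : i + kw.length < n ∧ pvWord (cs.getD (i + kw.length) ' ') = true
      · rw [if_pos h3]
      · exfalso
        have hje : pvTokEnd cs n (i+1) = i + kw.length := by
          apply pvTokEnd_eq_of cs n (i + kw.length) (by omega)
          · intro h
            by_contra hc
            exact h3 ⟨h, by simpa using hc⟩
          · have := List.length_pos_of_ne_nil hkw; omega
          · exact fun k hk1 hk2 => hword k (by omega) hk2
        apply htok
        rw [hje, List.drop_take]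
        rw [show i + kw.length - i = kw.length by omega]
        exact heq

theorem loopA_skip (cs : List Char) (n : Nat) :
    ∀ M a b (d : Int) (s : Nat) (p : List (List Char)), b - a ≤ M → a ≤ b →
    (∀ k, a ≤ k → k < b → 0 < k ∧ pvWord (cs.getD (k-1) ' ') = true) →
    pvLoopA cs n a d s p = pvLoopA cs n b d s p := by
  intro M
  induction M with
  | zero =>
      intro a b d s p h1 h2 _
      have : a = b := by omega
      rw [this]
  | succ M ih =>
      intro a b d s p h1 h2 hall
      rcases Nat.eq_or_lt_of_le h2 with h | h
      · rw [h]
      · by_cases ha : a < n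
        · have hk := hall a le_rfl h
          have hf : ∀ kw, pvKwAt cs n a kw = false := fun kw =>
            kwAt_false_of_prevword cs n a kw hk.1 hk.2
          rw [pvLoopA, dif_pos ha]
          simp only [hf, List.any_eq_true, Bool.false_eq_true, and_false, exists_false,
            if_false]
          exact ih (a+1) b d s p (by omega) (by omega)
            (fun k hk1 hk2 => hall k (by omega) hk2)
        · rw [pvLoopA, dif_neg ha, pvLoopA, dif_neg (by omega : ¬ b < n)]

theorem loopA_eq_tokens (cs : List Char) (n : Nat) (hn : n = cs.length) :
    ∀ N i (depth : Int) (start : Nat) (parts : List (List Char)), n - i ≤ N →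
    (i < n → pvWord (cs.getD i ' ') = true → (i = 0 ∨ pvWord (cs.getD (i-1) ' ') = false)) →
    pvLoopA cs n i depth start parts =
      (let st := (pvTokenize cs n i).foldl (pvStepB cs) (parts, depth, start)
       pvFinish cs st.1 st.2.2) := by
  intro N
  induction N with
  | zero =>
      intro i depth start parts hN _
      have hi : ¬ i < n := by omega
      rw [pvLoopA, dif_neg hi, pvTokenize, dif_neg hi]
      rfl
  | succ N ih =>
      intro i depth start parts hN hQ
      by_cases hi : i < n
      · by_cases hwi : pvWord (cs.getD i ' ') = true
        · -- token starts at i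
          have hb := hQ hi hwi
          have hij : i + 1 ≤ pvTokEnd cs n (i+1) := le_pvTokEnd cs n (i+1)
          have hjn : pvTokEnd cs n (i+1) ≤ n := pvTokEnd_le cs n (i+1) (by omega)
          have hkweq : ∀ kw, kw ≠ [] → kw.all pvWord = true →
              pvKwAt cs n i kw = decide ((cs.take (pvTokEnd cs n (i+1))).drop i = kw) :=
            fun kw h1 h2 => kwAt_eq_token cs n i kw hn hi hwi hb h1 h2
          have hQj : pvTokEnd cs n (i+1) < n →
              pvWord (cs.getD (pvTokEnd cs n (i+1)) ' ') = true →
              (pvTokEnd cs n (i+1) = 0 ∨ pvWord (cs.getD (pvTokEnd cs n (i+1) - 1) ' ') = false) := by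
            intro h hw'
            rw [pvTokEnd_stop cs n (i+1) h] at hw'
            exact absurd hw' (by simp)
          have hskip : ∀ (d' : Int) (s' : Nat) (p' : List (List Char)),
              pvLoopA cs n (i+1) d' s' p' = pvLoopA cs n (pvTokEnd cs n (i+1)) d' s' p' := by
            intro d' s' p'
            apply loopA_skip cs n (pvTokEnd cs n (i+1)) (i+1) (pvTokEnd cs n (i+1)) d' s' p'
              (by omega) hij
            intro k hk1 hk2
            refine ⟨by omega, ?_⟩
            rcases Nat.eq_or_lt_of_le (show i ≤ k - 1 by omega) with h | h
            · rw [← h]; exact hwi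
            · exact pvTokEnd_word cs n (i+1) (k-1) (by omega) (by omega)
          rw [pvLoopA, dif_pos hi, pvTokenize, dif_pos hi, if_pos hwi]
          simp only [List.foldl_cons]
          have hopen : (pvOpeners.any fun kw => pvKwAt cs n i kw) =
              decide ((cs.take (pvTokEnd cs n (i+1))).drop i ∈ pvOpeners) := by
            simp only [pvOpeners, List.any_cons, List.any_nil,
              hkweq ['i','f'] (by decide) (by decide),
              hkweq ['f','o','r'] (by decide) (by decide),
              hkweq ['w','h','i','l','e'] (by decide) (by decide),
              hkweq ['f','u','n','c','t','i','o','n'] (by decide) (by decide),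
              hkweq ['r','e','p','e','a','t'] (by decide) (by decide),
              hkweq ['d','o'] (by decide) (by decide),
              List.mem_cons, List.not_mem_nil, or_false, Bool.or_false]
            rw [Bool.eq_iff_iff]
            simp [Bool.or_eq_true]
          rw [hopen, hkweq pvEndKw (by decide) (by decide)]
          by_cases hmem : (cs.take (pvTokEnd cs n (i+1))).drop i ∈ pvOpeners
          · have hne : (cs.take (pvTokEnd cs n (i+1))).drop i ≠ pvEndKw := by
              simp only [pvOpeners, List.mem_cons, List.not_mem_nil, or_false] at hmem
              rcases hmem with h|h|h|h|h|h <;> (rw [h]; decide)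
            rw [if_pos (show decide ((cs.take (pvTokEnd cs n (i+1))).drop i ∈ pvOpeners) = true
                  by simp [hmem]),
                if_neg (show ¬ decide ((cs.take (pvTokEnd cs n (i+1))).drop i = pvEndKw) = true
                  by simp [hne])]
            rw [hskip, ih (pvTokEnd cs n (i+1)) (depth+1) start parts (by omega) hQj]
            simp [pvStepB, hmem]
          · rw [if_neg (show ¬ decide ((cs.take (pvTokEnd cs n (i+1))).drop i ∈ pvOpeners) = true
                  by simp [hmem])]
            by_cases hend : (cs.take (pvTokEnd cs n (i+1))).drop i = pvEndKw
            · have hj3 : pvTokEnd cs n (i+1) = i + 3 := by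
                have := congrArg List.length hend
                simp [List.length_take, List.length_drop, pvEndKw] at this
                omega
              rw [hj3] at hmem hend hQj hskip ⊢
              rw [if_pos (show decide ((cs.take (i+3)).drop i = pvEndKw) = true
                  by simp [hend])]
              by_cases hd : depth - 1 = 0
              · rw [if_pos hd]
                rw [hskip, ih (i+3) (depth - 1) (i+3)
                  (if PySem.Chars.strip ((cs.take (i+3)).drop start) = [] then parts
                   else parts ++ [PySem.Chars.strip ((cs.take (i+3)).drop start)])
                  (by omega) hQj]
                simp [pvStepB, hend, hd, (show pvEndKw ∉ pvOpeners by decide)]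
              · rw [if_neg hd]
                rw [hskip, ih (i+3) (depth - 1) start parts (by omega) hQj]
                simp [pvStepB, hend, hd, (show pvEndKw ∉ pvOpeners by decide)]
            · rw [if_neg (show ¬ decide ((cs.take (pvTokEnd cs n (i+1))).drop i = pvEndKw) = true
                  by simp [hend])]
              rw [hskip, ih (pvTokEnd cs n (i+1)) depth start parts (by omega) hQj]
              simp [pvStepB, hmem, hend]
        · -- no token starts at i
          have hw' : pvWord (cs.getD i ' ') = false := by
            cases h : pvWord (cs.getD i ' ') with
            | false => rfl
            | true => exact absurd h hwi
          have hf : ∀ kw, kw ≠ [] → pvWord (kw.headD ' ') = true → pvKwAt cs n i kw = false :=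
            fun kw h1 h2 => kwAt_false_of_nonword cs n i kw hw' h1 h2
          rw [pvLoopA, dif_pos hi, pvTokenize, dif_pos hi, if_neg hwi]
          have hopen : (pvOpeners.any fun kw => pvKwAt cs n i kw) = false := by
            simp [pvOpeners, List.any_cons,
              hf ['i','f'] (by decide) (by decide),
              hf ['f','o','r'] (by decide) (by decide),
              hf ['w','h','i','l','e'] (by decide) (by decide),
              hf ['f','u','n','c','t','i','o','n'] (by decide) (by decide),
              hf ['r','e','p','e','a','t'] (by decide) (by decide),
              hf ['d','o'] (by decide) (by decide)]
          rw [hopen, hf pvEndKw (by decide) (by decide)]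
          simp only [Bool.false_eq_true, if_false]
          exact ih (i+1) depth start parts (by omega)
            (fun _ _ => Or.inr (by simpa using hw'))
      · rw [pvLoopA, dif_neg hi, pvTokenize, dif_neg hi]
        rfl

-- ===== VERDICT (by name: the statement is the Claim_ definition above) =====
theorem split_inline_stmts_py_spec : Claim_equal_split_inline_stmts_py := by
  intro text _
  unfold Spec_split_inline_stmts_py split_inline_stmts_py split_inline_stmts_py_alt
  rw [loopA_eq_tokens text.toList text.toList.length rfl (text.toList.length) 0 0 0 []
    (by omega) (by intro h hw; exact Or.inl rfl)]
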